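-- pv_equiv track=rewrite | github.com/josueRdgz/Codeforces-codes | D_For_Wizards.py | for_wizards
-- ===== SOURCE A (Python) =====
-- def for_wizards(n):  # wrong answer user's subarray shift is not optimal (test case 107)
--
--     if n == sorted(n):
--         return (1, 1)
--
--     inversion = [0] * len(n)
--     maximum = [float('-inf')]*len(n)
--     end = list(range(len(n)))
--     for i in range(len(n)-1):
--         for j in range(i, len(n)):
--             if n[j] < n[i]:
--                 inversion[i] += 1
--             if n[j] > n[i]:
--                 inversion[i] -= 1
--             if inversion[i] > maximum[i]:
--                 maximum[i] = inversion[i]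
--                 end[i] = j
--     i = inversion.index(max(inversion[:-1]))
--     j = end[i]
--
--     return (i+1, j+1)
-- ===== SOURCE B (Python) =====
-- def for_wizards(n):
--     # Different algorithm: one right-to-left sweep maintaining a binary-searched
--     # sorted list of the suffix; each index's inversion balance is read off from
--     # the two bisection positions, then one linear pass recovers the best end.
--     if n == sorted(n):
--         return (1, 1)
--
--     def bisect_left(s, v):
--         lo, hi = 0, len(s)
--         while lo < hi:
--             mid = (lo + hi) // 2
--             if s[mid] < v:
--                 lo = mid + 1
--             else:
--                 hi = mid
--         return lo
--
--     def bisect_right(s, v):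
--         lo, hi = 0, len(s)
--         while lo < hi:
--             mid = (lo + hi) // 2
--             if s[mid] <= v:
--                 lo = mid + 1
--             else:
--                 hi = mid
--         return lo
--
--     s = []
--     t = []
--     for v in reversed(n):
--         lo = bisect_left(s, v)
--         hi = bisect_right(s, v)
--         t.append(lo - (len(s) - hi))
--         s.insert(lo, v)
--     t.reverse()
--
--     m = max(t[:-1])
--     i = t.index(m)
--
--     v = n[i]
--     run = 0
--     best = 0
--     j = i
--     for k in range(i + 1, len(n)):
--         x = n[k]
--         if x < v:
--             run += 1
--         elif x > v:
--             run -= 1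
--         if run > best:
--             best = run
--             j = k
--     return (i + 1, j + 1)
-- ===== Notes on version B (the rewrite author's own statement) =====
-- stated objective: faster
-- what changed: B replaces A's nested per-start suffix comparison loops (three length-n bookkeeping arrays updated inside an O(n^2) double loop) by a single right-to-left sweep that maintains a sorted list of the suffix and reads each index's smaller-minus-larger balance off two hand-written binary searches, then one linear pass recovers the best end for the winning index.
import Mathlib
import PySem

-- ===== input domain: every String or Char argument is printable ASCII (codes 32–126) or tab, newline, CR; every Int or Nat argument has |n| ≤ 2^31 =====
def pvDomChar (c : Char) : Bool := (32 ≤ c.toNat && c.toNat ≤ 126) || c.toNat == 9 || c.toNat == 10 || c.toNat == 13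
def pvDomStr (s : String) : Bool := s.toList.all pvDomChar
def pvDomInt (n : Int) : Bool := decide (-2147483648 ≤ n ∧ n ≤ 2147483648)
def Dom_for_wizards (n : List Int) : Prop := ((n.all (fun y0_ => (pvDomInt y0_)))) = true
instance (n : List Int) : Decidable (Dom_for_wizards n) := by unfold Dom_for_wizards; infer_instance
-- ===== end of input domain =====

-- B replaces A's nested per-start suffix loops by one right-to-left sweep that keeps a
-- binary-searched sorted list of the suffix, then a single linear pass for the best end.

-- ===== PORT A =====
-- reads/writes with Python's indexing; every index A uses is in range by construction, so the
-- defaults of pyGetD/pySetD are never hit inside the algorithm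
def azGet (xs : List Int) (i : Int) : Int := PySem.List.pyGetD xs i 0
def azGetO (xs : List (Option Int)) (i : Int) : Option Int := PySem.List.pyGetD xs i none
-- maximum[i] starts as float('-inf'); it is only ever used as a bottom element for '>',
-- so 'none' models it exactly: azLtO m v = (m < v) with none as -inf
def azLtO : Option Int → Int → Bool
  | none, _ => true
  | some m, v => decide (m < v)

-- the body of A's inner 'for j' loop, acting on the three arrays (state = (inversion, maximum, end))
def azInner (n : List Int) (i : Int)
    (st : List Int × List (Option Int) × List Int) (j : Int) :
    List Int × List (Option Int) × List Int :=
  let inv := st.1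
  let inv := if azGet n j < azGet n i then PySem.List.pySetD inv i (azGet inv i + 1) else inv
  let inv := if azGet n j > azGet n i then PySem.List.pySetD inv i (azGet inv i - 1) else inv
  if azLtO (azGetO st.2.1 i) (azGet inv i) then
    (inv, PySem.List.pySetD st.2.1 i (some (azGet inv i)), PySem.List.pySetD st.2.2 i j)
  else
    (inv, st.2.1, st.2.2)

def for_wizards (n : List Int) : List Int :=
  if n = PySem.List.sorted n (fun x => x) then [1, 1]
  else
    let len : Int := n.length
    let st0 := (List.replicate n.length (0 : Int),
                List.replicate n.length (none : Option Int),
                PySem.List.pyRange 0 len 1)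
    let st := (PySem.List.pyRange 0 (len - 1) 1).foldl
        (fun st i => (PySem.List.pyRange i len 1).foldl (azInner n i) st) st0
    -- n unsorted ⇒ len ≥ 2, so inversion[:-1] is nonempty and max/index cannot fail
    let m := (PySem.List.max? (PySem.List.slice st.1 none (some (-1))) (fun x => x)).getD 0
    let i : Int := ((PySem.List.index? st.1 m).getD 0 : Nat)
    let j := azGet st.2.2 i
    [i + 1, j + 1]

-- ===== PORT B =====
-- Source B's hand-written bisect loops (lo, hi, mid = (lo+hi)//2); s[mid] is always in range
-- when called with 0 ≤ lo ≤ hi ≤ len(s), so pyGetD's default is never hit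
def bzBisect (s : List Int) (p : Int → Bool) (lo hi : Nat) : Nat :=
  if h : lo < hi then
    if p (PySem.List.pyGetD s (((lo + hi) / 2 : Nat) : Int) 0) then
      bzBisect s p ((lo + hi) / 2 + 1) hi
    else
      bzBisect s p lo ((lo + hi) / 2)
  else lo
termination_by hi - lo
decreasing_by all_goals omega

-- one step of Source B's right-to-left sweep (state = (sorted suffix list s, appended totals t))
def bzStep (st : List Int × List Int) (v : Int) : List Int × List Int :=
  let s := st.1
  let lo := bzBisect s (fun x => decide (x < v)) 0 s.length
  let hi := bzBisect s (fun x => decide (x ≤ v)) 0 s.length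
  (PySem.List.insert s (lo : Int) v,
   st.2 ++ [((lo : Int) - ((s.length : Int) - (hi : Int)))])

-- body of Source B's final pass (state = (run, best, j))
def bzEndStep (n : List Int) (v : Int) (st : Int × Int × Int) (k : Int) : Int × Int × Int :=
  let x := PySem.List.pyGetD n k 0
  let run := if x < v then st.1 + 1 else if x > v then st.1 - 1 else st.1
  if run > st.2.1 then (run, run, k) else (run, st.2.1, st.2.2)

def bzEnd (n : List Int) (i : Int) : Int × Int × Int :=
  (PySem.List.pyRange (i + 1) (n.length : Int) 1).foldl
    (bzEndStep n (PySem.List.pyGetD n i 0)) (0, 0, i)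

def for_wizards_alt (n : List Int) : List Int :=
  if n = PySem.List.sorted n (fun x => x) then [1, 1]
  else
    let st := n.reverse.foldl bzStep ([], [])
    let t := st.2.reverse
    let m := (PySem.List.max? (PySem.List.slice t none (some (-1))) (fun x => x)).getD 0
    let i : Int := ((PySem.List.index? t m).getD 0 : Nat)
    let fin := bzEnd n i
    [i + 1, fin.2.2 + 1]

-- ===== PRECONDITION & SPEC =====
def Spec_for_wizards (n : List Int) (out : List Int) : Prop := out = for_wizards_alt n
instance (n : List Int) (out : List Int) : Decidable (Spec_for_wizards n out) := by unfold Spec_for_wizards; infer_instance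

-- ===== CLAIM (what is proved, stated in full; the proofs are below) =====
def Claim_equal_for_wizards : Prop := ∀ (n : List Int), Dom_for_wizards n → Spec_for_wizards n (for_wizards n)

-- ===== LEMMAS AND PROOFS =====

-- the plain suffix balance (+1 per smaller, -1 per larger element)
def bzTotal (v : Int) (xs : List Int) : Int :=
  xs.foldl (fun t x => if x < v then t + 1 else if x > v then t - 1 else t) 0

-- the scalar shadow of A's inner loop body: what azInner does to cell i of the three arrays
def locStep (v : Int) (st : Int × Option Int × Int) (x : Int) (j : Int) : Int × Option Int × Int :=
  let inv := if x < v then st.1 + 1 else st.1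
  let inv2 := if x > v then inv - 1 else inv
  if azLtO st.2.1 inv2 then (inv2, some inv2, j) else (inv2, st.2.1, st.2.2)

def locFold (n : List Int) (i : Int) : Int × Option Int × Int :=
  (PySem.List.pyRange i (n.length : Int) 1).foldl
    (fun st j => locStep (PySem.List.pyGetD n i 0) st (PySem.List.pyGetD n j 0) j) (0, none, i)

lemma getD_set_self {α : Type} (xs : List α) (p : Nat) (v d : α) (h : p < xs.length) :
    (xs.set p v).getD p d = v := by
  simp [List.getD_eq_getElem?_getD, List.getElem?_set_self, h]

-- azInner touches only cell i; its effect there is locStep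
lemma azInner_set (n : List Int) (p : Nat) (j : Int)
    (inv : List Int) (mx : List (Option Int)) (en : List Int)
    (h1 : p < inv.length) (h2 : p < mx.length) (h3 : p < en.length) :
    azInner n (p : Int) (inv, mx, en) j =
      (inv.set p (locStep (azGet n p) (inv.getD p 0, mx.getD p none, en.getD p 0) (azGet n j) j).1,
       mx.set p (locStep (azGet n p) (inv.getD p 0, mx.getD p none, en.getD p 0) (azGet n j) j).2.1,
       en.set p (locStep (azGet n p) (inv.getD p 0, mx.getD p none, en.getD p 0) (azGet n j) j).2.2) := by
  simp only [azInner, locStep, azGet, azGetO, PySem.List.pySetD_natCast, PySem.List.pyGetD_natCast]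
  split_ifs with hlt hgt hc hc hgt hc hc
  all_goals
    simp_all [getD_set_self, List.set_set, List.set_getElem_self, List.getD_eq_getElem?_getD]

-- A's whole inner loop = set-form of the scalar fold
lemma azInner_fold (n : List Int) (p : Nat) (js : List Int) :
    ∀ (inv : List Int) (mx : List (Option Int)) (en : List Int),
    p < inv.length → p < mx.length → p < en.length →
    js.foldl (azInner n (p : Int)) (inv, mx, en) =
      (inv.set p (js.foldl (fun st j => locStep (azGet n p) st (azGet n j) j) (inv.getD p 0, mx.getD p none, en.getD p 0)).1,
       mx.set p (js.foldl (fun st j => locStep (azGet n p) st (azGet n j) j) (inv.getD p 0, mx.getD p none, en.getD p 0)).2.1,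
       en.set p (js.foldl (fun st j => locStep (azGet n p) st (azGet n j) j) (inv.getD p 0, mx.getD p none, en.getD p 0)).2.2) := by
  induction js with
  | nil =>
    intro inv mx en h1 h2 h3
    simp [List.set_getElem_self, List.getD_eq_getElem?_getD, List.getElem?_eq_getElem, h1, h2, h3]
  | cons j js ih =>
    intro inv mx en h1 h2 h3
    rw [List.foldl_cons, azInner_set n p j inv mx en h1 h2 h3,
      ih _ _ _ (by simpa using h1) (by simpa using h2) (by simpa using h3)]
    simp [List.set_set, getD_set_self, h1, h2, h3]

-- locStep on an established state mirrors bzEndStep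
lemma locStep_fold_bzEnd (n : List Int) (v : Int) (js : List Int) :
    ∀ (r b e : Int),
      js.foldl (fun st j => locStep v st (PySem.List.pyGetD n j 0) j) (r, some b, e) =
        ((js.foldl (bzEndStep n v) (r, b, e)).1,
         some (js.foldl (bzEndStep n v) (r, b, e)).2.1,
         (js.foldl (bzEndStep n v) (r, b, e)).2.2) := by
  induction js with
  | nil => intro r b e; rfl
  | cons j js ih =>
    intro r b e
    rw [List.foldl_cons, List.foldl_cons]
    have hstep : locStep v (r, some b, e) (PySem.List.pyGetD n j 0) j =
        ((bzEndStep n v (r, b, e) j).1, some (bzEndStep n v (r, b, e) j).2.1,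
         (bzEndStep n v (r, b, e) j).2.2) := by
      simp only [locStep, bzEndStep, azLtO]
      split_ifs <;> simp_all <;> omega
    rw [hstep, ih]

-- cell i of A's arrays after the inner loop = B's final-pass fold
lemma locFold_eq_bzEnd (n : List Int) (i : Int) (h1 : i < (n.length : Int)) :
    locFold n i = ((bzEnd n i).1, some (bzEnd n i).2.1, (bzEnd n i).2.2) := by
  rw [locFold, PySem.List.pyRange_one_cons h1, List.foldl_cons]
  have h2 : locStep (PySem.List.pyGetD n i 0) (0, none, i) (PySem.List.pyGetD n i 0) i
      = (0, some 0, i) := by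
    simp [locStep, azLtO]
  rw [h2, bzEnd, locStep_fold_bzEnd]

lemma bzEndStep_fst (n : List Int) (v : Int) (js : List Int) :
    ∀ (st : Int × Int × Int),
      (js.foldl (bzEndStep n v) st).1 =
        js.foldl (fun t j => (fun t x => if x < v then t + 1 else if x > v then t - 1 else t) t
          (PySem.List.pyGetD n j 0)) st.1 := by
  induction js with
  | nil => intro st; rfl
  | cons j js ih =>
    intro st
    rw [List.foldl_cons, List.foldl_cons, ih]
    simp only [bzEndStep]
    split_ifs <;> rfl

-- first component of B's final pass is the plain suffix total
lemma bzEnd_fst (n : List Int) (i : Int) (h0 : 0 ≤ i) :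
    (bzEnd n i).1 = bzTotal (PySem.List.pyGetD n i 0) (PySem.List.slice n (some (i + 1)) none) := by
  have h := PySem.List.foldl_pyRange_pyGetD' n 0
    (fun (t : Int) x => if x < PySem.List.pyGetD n i 0 then t + 1
      else if x > PySem.List.pyGetD n i 0 then t - 1 else t) 0 (a := i + 1) (by omega)
  rw [bzEnd, bzEndStep_fst, bzTotal]
  simpa [PySem.List.slice_from n (show (0:Int) ≤ i + 1 by omega)] using h

-- the per-index suffix total
def gTot (n : List Int) (p : Nat) : Int :=
  bzTotal (PySem.List.pyGetD n (p : Int) 0) (PySem.List.slice n (some ((p : Int) + 1)) none)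

-- A's outer loop, stopped after the first m indices
def azOuter (n : List Int) (m : Nat) : List Int × List (Option Int) × List Int :=
  (PySem.List.pyRange 0 (m : Int) 1).foldl
    (fun st i => (PySem.List.pyRange i (n.length : Int) 1).foldl (azInner n i) st)
    (List.replicate n.length (0 : Int),
     List.replicate n.length (none : Option Int),
     PySem.List.pyRange 0 (n.length : Int) 1)

-- invariant of A's outer loop
lemma azOuter_inv (n : List Int) (m : Nat) (hm : m ≤ n.length) :
    (azOuter n m).1.length = n.length ∧ (azOuter n m).2.1.length = n.length ∧
    (azOuter n m).2.2.length = n.length ∧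
    ∀ (p : Nat), p < n.length →
      (azOuter n m).1.getD p 0 = (if p < m then (locFold n p).1 else 0) ∧
      (azOuter n m).2.1.getD p none = (if p < m then (locFold n p).2.1 else none) ∧
      (azOuter n m).2.2.getD p 0 = (if p < m then (locFold n p).2.2 else (p : Int)) := by
  induction m with
  | zero =>
    refine ⟨by simp [azOuter], by simp [azOuter], by simp [azOuter], ?_⟩
    intro p hp
    refine ⟨?_, ?_, ?_⟩
    · simp [azOuter, List.getD_eq_getElem?_getD, List.getElem?_eq_getElem, hp]
    · simp [azOuter, List.getD_eq_getElem?_getD, List.getElem?_eq_getElem, hp]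
    · have hp' : p < (PySem.List.pyRange 0 (n.length : Int) 1).length := by
        simpa [PySem.List.length_pyRange_one] using hp
      simp [azOuter, List.getD_eq_getElem?_getD, List.getElem?_eq_getElem, hp', hp,
        PySem.List.getElem_pyRange_one]
  | succ m ih =>
    have hm' : m ≤ n.length := by omega
    have hmn : m < n.length := by omega
    obtain ⟨hl1, hl2, hl3, hv⟩ := ih hm'
    have hstep : azOuter n (m + 1) =
        (PySem.List.pyRange (m : Int) (n.length : Int) 1).foldl (azInner n (m : Int)) (azOuter n m) := by
      rw [azOuter, azOuter, show ((m + 1 : Nat) : Int) = (m : Int) + 1 by push_cast; ring,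
        PySem.List.pyRange_one_succ_right (by positivity), List.foldl_append]
      rfl
    have heta : azOuter n m = ((azOuter n m).1, (azOuter n m).2.1, (azOuter n m).2.2) := rfl
    have hfold := azInner_fold n m (PySem.List.pyRange (m : Int) (n.length : Int) 1)
      (azOuter n m).1 (azOuter n m).2.1 (azOuter n m).2.2
      (by rw [hl1]; exact hmn) (by rw [hl2]; exact hmn) (by rw [hl3]; exact hmn)
    obtain ⟨g1, g2, g3⟩ := hv m hmn
    have hin : ((azOuter n m).1.getD m 0, (azOuter n m).2.1.getD m none,
        (azOuter n m).2.2.getD m 0) = ((0 : Int), (none : Option Int), (m : Int)) := by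
      rw [g1, g2, g3]; simp
    have hloc : (PySem.List.pyRange (m : Int) (n.length : Int) 1).foldl
        (fun st j => locStep (azGet n (m : Int)) st (azGet n j) j)
        ((azOuter n m).1.getD m 0, (azOuter n m).2.1.getD m none, (azOuter n m).2.2.getD m 0)
        = locFold n (m : Int) := by
      rw [hin, locFold]; rfl
    have hfin : azOuter n (m + 1) =
        ((azOuter n m).1.set m (locFold n (m : Int)).1,
         (azOuter n m).2.1.set m (locFold n (m : Int)).2.1,
         (azOuter n m).2.2.set m (locFold n (m : Int)).2.2) := by
      rw [hstep]
      conv_lhs => rw [heta]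
      rw [hfold, hloc]
    rw [hfin]
    refine ⟨by simpa using hl1, by simpa using hl2, by simpa using hl3, ?_⟩
    intro p hp
    by_cases hpm : p = m
    · subst hpm
      constructor
      · rw [getD_set_self _ _ _ _ (by omega)]; simp
      constructor
      · rw [getD_set_self _ _ _ _ (by omega)]; simp
      · rw [getD_set_self _ _ _ _ (by omega)]; simp
    · obtain ⟨e1, e2, e3⟩ := hv p hp
      have hne : ∀ {α : Type} (xs : List α) (v d : α), (xs.set m v).getD p d = xs.getD p d := by
        intro α xs v d
        simp [List.getD_eq_getElem?_getD, List.getElem?_set_ne (show m ≠ p by omega)]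
      rw [hne, hne, hne, e1, e2, e3]
      have h1 : p < m ↔ p < m + 1 := by omega
      exact ⟨by simp only [h1], by simp only [h1], by simp only [h1]⟩

lemma gTot_eq (n : List Int) (q : Nat) (hq : q < n.length) :
    (locFold n (q : Int)).1 = gTot n q := by
  rw [locFold_eq_bzEnd n q (by exact_mod_cast hq), gTot, ← bzEnd_fst n q (by positivity)]

-- ===== B-side lemmas =====

-- sorted list + downward-closed predicate: countP = length of the true prefix
lemma countP_eq_takeWhile_len (p : Int → Bool)
    (hm : ∀ x y : Int, x ≤ y → p y = true → p x = true) :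
    ∀ (s : List Int), s.Pairwise (· ≤ ·) → s.countP p = (s.takeWhile p).length := by
  intro s hs
  induction s with
  | nil => simp
  | cons x t ih =>
    rw [List.pairwise_cons] at hs
    by_cases hx : p x = true
    · simp [List.countP_cons, List.takeWhile_cons, hx, ih hs.2]
    · have ht : t.countP p = 0 := by
        rw [List.countP_eq_zero]
        intro y hy hpy
        exact hx (hm x y (hs.1 y hy) hpy)
      simp [List.countP_cons, List.takeWhile_cons, hx, ht]

lemma dropWhile_not (p : Int → Bool)
    (hm : ∀ x y : Int, x ≤ y → p y = true → p x = true) :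
    ∀ (s : List Int), s.Pairwise (· ≤ ·) → ∀ y ∈ s.dropWhile p, p y = false := by
  intro s hs
  induction s with
  | nil => simp
  | cons x t ih =>
    rw [List.pairwise_cons] at hs
    by_cases hx : p x = true
    · simpa [List.dropWhile_cons, hx] using ih hs.2
    · intro y hy
      rw [List.dropWhile_cons, if_neg hx] at hy
      rcases List.mem_cons.1 hy with rfl | hy
      · exact Bool.eq_false_iff.2 hx
      · by_contra hpy
        exact hx (hm x y (hs.1 y hy) (Bool.of_not_eq_false hpy))

lemma countP_pos_of_get (p : Int → Bool)
    (hm : ∀ x y : Int, x ≤ y → p y = true → p x = true)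
    (s : List Int) (hs : s.Pairwise (· ≤ ·)) (k : Nat) (hk : k < s.length)
    (hp : p s[k] = true) : k + 1 ≤ s.countP p := by
  rw [countP_eq_takeWhile_len p hm s hs]
  by_contra hcon
  have hlen : (s.takeWhile p).length ≤ k := by omega
  have hsplit : s = s.takeWhile p ++ s.dropWhile p := (List.takeWhile_append_dropWhile).symm
  have h1 : s[k]? = some s[k] := List.getElem?_eq_getElem hk
  have h2 : s[k]? = (s.dropWhile p)[k - (s.takeWhile p).length]? := by
    conv_lhs => rw [hsplit]
    exact List.getElem?_append_right hlen
  have hmem : s[k] ∈ s.dropWhile p := List.mem_of_getElem? (by rw [← h2, h1])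
  have := dropWhile_not p hm s hs _ hmem
  rw [hp] at this
  simp at this

lemma countP_le_of_get (p : Int → Bool)
    (s : List Int) (k : Nat) (hk : k < s.length)
    (hp : p s[k] = false) (hs : s.Pairwise (· ≤ ·))
    (hm : ∀ x y : Int, x ≤ y → p y = true → p x = true) : s.countP p ≤ k := by
  rw [countP_eq_takeWhile_len p hm s hs]
  by_contra hcon
  have hlt : k < (s.takeWhile p).length := by omega
  have hsplit : s = s.takeWhile p ++ s.dropWhile p := (List.takeWhile_append_dropWhile).symm
  have h1 : s[k]? = some s[k] := List.getElem?_eq_getElem hk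
  have h2 : s[k]? = (s.takeWhile p)[k]? := by
    conv_lhs => rw [hsplit]
    exact List.getElem?_append_left hlt
  have hmem : s[k] ∈ s.takeWhile p := List.mem_of_getElem? (by rw [← h2, h1])
  have := List.mem_takeWhile_imp hmem
  rw [hp] at this
  simp at this

-- the hand-written binary search finds countP on a sorted list
lemma bzBisect_eq (s : List Int) (p : Int → Bool)
    (hm : ∀ x y : Int, x ≤ y → p y = true → p x = true) (hs : s.Pairwise (· ≤ ·)) :
    ∀ (d lo hi : Nat), hi - lo ≤ d → lo ≤ s.countP p → s.countP p ≤ hi → hi ≤ s.length →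
      bzBisect s p lo hi = s.countP p := by
  intro d
  induction d with
  | zero =>
    intro lo hi hd h1 h2 h3
    rw [bzBisect, dif_neg (by omega)]
    omega
  | succ d ih =>
    intro lo hi hd h1 h2 h3
    rw [bzBisect]
    by_cases hlt : lo < hi
    · rw [dif_pos hlt]
      have hmidlt : (lo + hi) / 2 < s.length := by omega
      have hget : PySem.List.pyGetD s ((((lo + hi) / 2 : Nat)) : Int) 0
          = s.getD ((lo + hi) / 2) 0 := PySem.List.pyGetD_natCast s _ 0
      have hgetE : s.getD ((lo + hi) / 2) 0 = s[(lo + hi) / 2] := by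
        simp [List.getD_eq_getElem?_getD, List.getElem?_eq_getElem, hmidlt]
      by_cases hp : p s[(lo + hi) / 2] = true
      · rw [if_pos (by rw [hget, hgetE]; exact hp)]
        exact ih _ _ (by omega)
          (countP_pos_of_get p hm s hs _ hmidlt hp) h2 h3
      · rw [if_neg (by rw [hget, hgetE]; exact hp)]
        exact ih _ _ (by omega) h1
          (countP_le_of_get p s _ hmidlt (Bool.eq_false_iff.2 hp) hs hm) (by omega)
    · rw [dif_neg hlt]; omega
  termination_by d => d

-- inserting v at position countP (· < v) keeps the list sorted and permutes v :: s
lemma insert_at_countP (s : List Int) (v : Int) (hs : s.Pairwise (· ≤ ·)) :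
    (s.takeWhile (fun x => decide (x < v)) ++ v :: s.dropWhile (fun x => decide (x < v))).Pairwise (· ≤ ·) ∧
    (s.takeWhile (fun x => decide (x < v)) ++ v :: s.dropWhile (fun x => decide (x < v))).Perm (v :: s) := by
  have hm : ∀ x y : Int, x ≤ y → decide (y < v) = true → decide (x < v) = true := by
    intro x y hxy h; simp at h ⊢; omega
  have hsplit : s.takeWhile (fun x => decide (x < v)) ++ s.dropWhile (fun x => decide (x < v)) = s :=
    List.takeWhile_append_dropWhile
  have hdw : ∀ y ∈ s.dropWhile (fun x => decide (x < v)), v ≤ y := by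
    intro y hy
    have := dropWhile_not (fun x => decide (x < v)) hm s hs y hy
    simp at this; omega
  have htw : ∀ x ∈ s.takeWhile (fun x => decide (x < v)), x < v := by
    intro x hx
    have := List.mem_takeWhile_imp hx
    simpa using this
  have hps : (s.takeWhile (fun x => decide (x < v))).Pairwise (· ≤ ·) ∧
      (s.dropWhile (fun x => decide (x < v))).Pairwise (· ≤ ·) ∧
      ∀ x ∈ s.takeWhile (fun x => decide (x < v)),
        ∀ y ∈ s.dropWhile (fun x => decide (x < v)), x ≤ y := by
    have := hs
    conv at this => rw [← hsplit]
    exact ⟨(List.pairwise_append.1 this).1, (List.pairwise_append.1 this).2.1,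
      (List.pairwise_append.1 this).2.2⟩
  constructor
  · rw [List.pairwise_append]
    refine ⟨hps.1, ?_, ?_⟩
    · rw [List.pairwise_cons]
      exact ⟨hdw, hps.2.1⟩
    · intro x hx y hy
      rcases List.mem_cons.1 hy with rfl | hy
      · exact le_of_lt (htw x hx)
      · exact hps.2.2 x hx y hy
  · have hpm := List.perm_middle (a := v) (l₁ := s.takeWhile (fun x => decide (x < v)))
      (l₂ := s.dropWhile (fun x => decide (x < v)))
    rw [hsplit] at hpm
    exact hpm

-- the per-suffix totals, defined structurally
def tList : List Int → List Int
  | [] => []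
  | x :: l => bzTotal x l :: tList l

lemma bzTotal_countP_aux (v : Int) (xs : List Int) : ∀ (acc : Int),
    xs.foldl (fun t x => if x < v then t + 1 else if x > v then t - 1 else t) acc =
      acc + (xs.countP (fun x => decide (x < v)) : Int)
        - ((xs.length : Int) - (xs.countP (fun x => decide (x ≤ v)) : Int)) := by
  induction xs with
  | nil => intro acc; simp
  | cons x l ih =>
    intro acc
    rw [List.foldl_cons, ih]
    simp only [List.countP_cons, List.length_cons]
    by_cases h1 : x < v
    · rw [if_pos h1]
      simp only [decide_eq_true_eq, if_pos h1, if_pos (le_of_lt h1)]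
      push_cast; ring
    · rw [if_neg h1]
      by_cases h2 : x > v
      · rw [if_pos h2]
        simp only [decide_eq_true_eq, if_neg h1, if_neg (by omega : ¬ x ≤ v)]
        push_cast; ring
      · rw [if_neg h2]
        simp only [decide_eq_true_eq, if_neg h1, if_pos (by omega : x ≤ v)]
        push_cast; ring

lemma bzTotal_countP (v : Int) (xs : List Int) :
    bzTotal v xs = (xs.countP (fun x => decide (x < v)) : Int)
      - ((xs.length : Int) - (xs.countP (fun x => decide (x ≤ v)) : Int)) := by
  rw [bzTotal, bzTotal_countP_aux]; ring

-- invariant of B's right-to-left sweep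
lemma bz_loop (l : List Int) :
    (l.reverse.foldl bzStep ([], [])).1.Pairwise (· ≤ ·) ∧
    (l.reverse.foldl bzStep ([], [])).1.Perm l ∧
    (l.reverse.foldl bzStep ([], [])).2 = (tList l).reverse := by
  induction l with
  | nil => exact ⟨List.Pairwise.nil, List.Perm.refl _, rfl⟩
  | cons x l ih =>
    obtain ⟨hsorted, hperm, hacc⟩ := ih
    have hstep : (x :: l).reverse.foldl bzStep ([], [])
        = bzStep (l.reverse.foldl bzStep ([], [])) x := by
      rw [List.reverse_cons, List.foldl_append, List.foldl_cons, List.foldl_nil]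
    set s := (l.reverse.foldl bzStep ([], [])).1 with hsdef
    have hmlt : ∀ a b : Int, a ≤ b → decide (b < x) = true → decide (a < x) = true := by
      intro a b hab h; simp at h ⊢; omega
    have hmle : ∀ a b : Int, a ≤ b → decide (b ≤ x) = true → decide (a ≤ x) = true := by
      intro a b hab h; simp at h ⊢; omega
    have hlo : bzBisect s (fun y => decide (y < x)) 0 s.length
        = s.countP (fun y => decide (y < x)) :=
      bzBisect_eq s _ hmlt hsorted s.length 0 s.length (by omega) (by omega)
        List.countP_le_length (le_refl _)
    have hhi : bzBisect s (fun y => decide (y ≤ x)) 0 s.length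
        = s.countP (fun y => decide (y ≤ x)) :=
      bzBisect_eq s _ hmle hsorted s.length 0 s.length (by omega) (by omega)
        List.countP_le_length (le_refl _)
    have hloTW : s.countP (fun y => decide (y < x)) = (s.takeWhile (fun y => decide (y < x))).length :=
      countP_eq_takeWhile_len _ hmlt s hsorted
    have hins : PySem.List.insert s ((s.countP (fun y => decide (y < x)) : Nat) : Int) x
        = s.takeWhile (fun y => decide (y < x)) ++ x :: s.dropWhile (fun y => decide (y < x)) := by
      rw [PySem.List.insert_natCast s _ x List.countP_le_length, hloTW]
      congr 1
      · exact (List.prefix_iff_eq_take.1 (List.takeWhile_prefix _)).symm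
      · congr 1
        have hsplit2 := List.takeWhile_append_dropWhile (p := fun y => decide (y < x)) (l := s)
        have h3 := congrArg (List.drop (s.takeWhile (fun y => decide (y < x))).length) hsplit2
        rw [List.drop_left] at h3
        exact h3.symm
    obtain ⟨hins_sorted, hins_perm⟩ := insert_at_countP s x hsorted
    have hcntlt : s.countP (fun y => decide (y < x)) = l.countP (fun y => decide (y < x)) :=
      hperm.countP_eq _
    have hcntle : s.countP (fun y => decide (y ≤ x)) = l.countP (fun y => decide (y ≤ x)) :=
      hperm.countP_eq _
    have hlen : s.length = l.length := hperm.length_eq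
    refine ⟨?_, ?_, ?_⟩
    · rw [hstep]
      show (PySem.List.insert s (_ : Int) x).Pairwise (· ≤ ·)
      rw [hlo, hins]; exact hins_sorted
    · rw [hstep]
      show (PySem.List.insert s (_ : Int) x).Perm (x :: l)
      rw [hlo, hins]
      exact hins_perm.trans (List.Perm.cons x hperm)
    · rw [hstep]
      show (l.reverse.foldl bzStep ([], [])).2 ++ [_] = (tList (x :: l)).reverse
      rw [hacc, hlo, hhi]
      show (tList l).reverse ++ [((s.countP (fun y => decide (y < x)) : Nat) : Int)
        - ((s.length : Int) - ((s.countP (fun y => decide (y ≤ x)) : Nat) : Int))]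
        = (tList (x :: l)).reverse
      rw [tList, List.reverse_cons, hcntlt, hcntle, hlen, bzTotal_countP x l]
  -- done

-- tList in terms of getD/drop
lemma tList_eq_map (l : List Int) :
    tList l = (List.range l.length).map (fun p => bzTotal (l.getD p 0) (l.drop (p + 1))) := by
  induction l with
  | nil => simp [tList]
  | cons x l ih =>
    rw [tList, ih, List.length_cons, List.range_succ_eq_map, List.map_cons, List.map_map]
    congr 1

-- gTot is the same function for indices in range
lemma gTot_getD (n : List Int) (p : Nat) (hp : p < n.length) :
    gTot n p = bzTotal (n.getD p 0) (n.drop (p + 1)) := by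
  have ht : ((p : Int) + 1).toNat = p + 1 := by omega
  rw [gTot, PySem.List.pyGetD_natCast,
    PySem.List.slice_from n (show (0:Int) ≤ (p : Int) + 1 by positivity), ht]

lemma tList_eq_gTot (n : List Int) :
    tList n = (List.range n.length).map (gTot n) := by
  rw [tList_eq_map]
  refine (List.map_congr_left ?_).symm
  intro p hp
  exact gTot_getD n p (List.mem_range.1 hp)

lemma index?_isSome_of_mem (l : List Int) (v : Int) (h : v ∈ l) :
    ∃ k, PySem.List.index? l v = some k := by
  have h1 : (PySem.List.index? l v).isSome := by
    rw [PySem.List.index?_isSome_iff]; exact h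
  exact Option.isSome_iff_exists.1 h1

-- ===== VERDICT proof =====
theorem for_wizards_spec : Claim_equal_for_wizards := by
  intro n _
  show for_wizards n = for_wizards_alt n
  by_cases hs : n = PySem.List.sorted n (fun x => x)
  · rw [for_wizards, for_wizards_alt, if_pos hs, if_pos hs]
  · have hL2 : 2 ≤ n.length := by
      rcases n with _ | ⟨x, _ | ⟨y, t⟩⟩
      · exact absurd (PySem.List.sorted_eq_self_of_pairwise _ (fun x => x) (by simp)).symm hs
      · exact absurd (PySem.List.sorted_eq_self_of_pairwise _ (fun x => x) (by simp)).symm hs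
      · simp
    have hcast : ((n.length : Int) - 1) = ((n.length - 1 : Nat) : Int) := by omega
    obtain ⟨hl1, hl2, hl3, hv⟩ := azOuter_inv n (n.length - 1) (by omega)
    -- A's inversion array is the list of suffix totals
    have hinv : (azOuter n (n.length - 1)).1 = (List.range (n.length - 1)).map (gTot n) ++ [0] := by
      apply List.ext_getElem
      · simp [hl1]; omega
      · intro q hq1 hq2
        have hqL : q < n.length := by rwa [hl1] at hq1
        have hgetD : (azOuter n (n.length - 1)).1[q] = (azOuter n (n.length - 1)).1.getD q 0 := by
          simp [List.getD_eq_getElem?_getD, List.getElem?_eq_getElem, hq1]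
        rw [hgetD, (hv q hqL).1]
        by_cases hql : q < n.length - 1
        · rw [if_pos hql, gTot_eq n q hqL,
            List.getElem_append_left (by simpa using hql), List.getElem_map, List.getElem_range]
        · rw [if_neg hql,
            List.getElem_append_right (le_of_not_gt (by simpa using hql))]
          simp
    -- the trailing suffix total is 0, so A's array equals B's t
    have hzero : gTot n (n.length - 1) = 0 := by
      rw [gTot_getD n (n.length - 1) (by omega)]
      have : n.drop (n.length - 1 + 1) = [] := by
        apply List.drop_eq_nil_of_le; omega
      rw [this]; rfl
    have htL : tList n = (List.range (n.length - 1)).map (gTot n) ++ [0] := by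
      rw [tList_eq_gTot, show n.length = (n.length - 1) + 1 by omega, List.range_succ,
        List.map_append, List.map_singleton]
      simp [hzero]
    have hA1 : (azOuter n (n.length - 1)).1 = tList n := by rw [hinv, htL]
    obtain ⟨_, _, hacc⟩ := bz_loop n
    have hB : ((n.reverse.foldl bzStep ([], [])).2).reverse = tList n := by
      rw [hacc, List.reverse_reverse]
    -- the shared selection: m and the first index p of m
    set pref := (List.range (n.length - 1)).map (gTot n) with hpref
    have hprefne : pref ≠ [] := by
      rw [hpref]
      simp [List.map_eq_nil_iff, List.range_eq_nil]
      omega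
    have hdrop : PySem.List.slice (tList n) none (some (-1)) = pref := by
      rw [PySem.List.slice_to_neg_one, htL, List.dropLast_concat]
    obtain ⟨M, hM⟩ : ∃ M, PySem.List.max? pref (fun x => x) = some M := by
      cases h : PySem.List.max? pref (fun x => x) with
      | none => exact absurd ((PySem.List.max?_eq_none_iff pref (fun x => x)).1 h) hprefne
      | some M => exact ⟨M, rfl⟩
    have hMmem : M ∈ pref := PySem.List.max?_mem hM
    obtain ⟨p, hp⟩ := index?_isSome_of_mem pref M hMmem
    have hidx : PySem.List.index? (tList n) M = some p := by
      rw [htL, PySem.List.index?_append_of_mem _ hMmem, hp]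
    have hplt : p < n.length - 1 := by
      obtain ⟨hk, -, -⟩ := PySem.List.getElem_of_index?_eq_some hp
      simpa [hpref] using hk
    -- A's end value at p equals B's final pass
    have hj : azGet (azOuter n (n.length - 1)).2.2 (p : Int) = (bzEnd n (p : Int)).2.2 := by
      have h2 := (hv p (by omega)).2.2
      rw [if_pos (by omega)] at h2
      rw [azGet, PySem.List.pyGetD_natCast, h2,
        locFold_eq_bzEnd n p (by exact_mod_cast (by omega : p < n.length))]
    rw [for_wizards, for_wizards_alt, if_neg hs, if_neg hs]
    simp only [hcast]
    rw [← azOuter, hA1, hB, hdrop, hM]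
    simp only [Option.getD_some]
    rw [hidx]
    simp only [Option.getD_some]
    rw [hj]
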